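-- pv_equiv track=rewrite | github.com/g0dux/AresProbe | aresprobe/core/token_sequencer.py | _has_repeating_pattern
-- ===== SOURCE A (Python) =====
-- from typing import Dict, List, Optional, Any, Tuple
--
-- def _has_repeating_pattern(tokens: List[str]) -> bool:
--     """Check for repeating patterns"""
--     if len(tokens) < 6:
--         return False
--
--     # Check for simple repetition
--     for i in range(1, len(tokens) // 2 + 1):
--         pattern = tokens[:i]
--         if all(tokens[j:j+i] == pattern for j in range(i, len(tokens), i)):
--             return True
--
--     return False
-- ===== SOURCE B (Python) =====
-- from typing import List
--
-- def _has_repeating_pattern(tokens: List[str]) -> bool: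
--     """Check for repeating patterns"""
--     n = len(tokens)
--     if n < 6:
--         return False
--     # i is a period of the whole list iff i divides n and the list equals
--     # itself shifted by i; no chunk-by-chunk scan needed.
--     for i in range(1, n // 2 + 1):
--         if n % i == 0 and tokens[i:] == tokens[:n - i]:
--             return True
--     return False
-- ===== Notes on version B (the rewrite author's own statement) =====
-- stated objective: faster
-- what changed: A scans every candidate period i up to n/2 and compares the list chunk-by-chunk against the prefix; B filters candidates by an O(1) divisibility test and, only for divisors of n, does a single shift comparison tokens[i:] == tokens[:n-i], using the fact that i is a full-repetition period iff i divides n and the list equals itself shifted by i.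
import Mathlib
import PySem

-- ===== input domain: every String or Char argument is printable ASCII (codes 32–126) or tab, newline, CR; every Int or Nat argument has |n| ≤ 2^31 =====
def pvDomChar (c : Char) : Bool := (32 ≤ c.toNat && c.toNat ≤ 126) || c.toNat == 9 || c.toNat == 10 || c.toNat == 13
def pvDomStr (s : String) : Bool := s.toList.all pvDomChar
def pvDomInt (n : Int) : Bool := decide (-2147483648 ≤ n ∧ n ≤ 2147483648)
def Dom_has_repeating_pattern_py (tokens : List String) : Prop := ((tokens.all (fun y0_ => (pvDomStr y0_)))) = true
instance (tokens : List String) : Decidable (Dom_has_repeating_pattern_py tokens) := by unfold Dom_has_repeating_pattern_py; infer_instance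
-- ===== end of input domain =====

-- B replaces A's O(n^2) chunk-by-chunk scan for each candidate period with a
-- divisibility filter plus one shift comparison tokens[i:] == tokens[:n-i].

-- ===== PORT A =====
def has_repeating_pattern_py (tokens : List String) : Bool :=
  if (tokens.length : Int) < 6 then false
  else
    (PySem.List.pyRange 1 (PySem.Int.floordiv (tokens.length : Int) 2 + 1) 1).any (fun i =>
      (PySem.List.pyRange i (tokens.length : Int) i).all (fun j =>
        PySem.List.slice tokens (some j) (some (j + i)) ==
          PySem.List.slice tokens (some 0) (some i)))

-- ===== PORT B =====
def has_repeating_pattern_py_alt (tokens : List String) : Bool :=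
  if tokens.length < 6 then false
  else
    (List.range' 1 (tokens.length / 2)).any (fun i =>
      tokens.length % i == 0 && (tokens.drop i == tokens.take (tokens.length - i)))

-- ===== PRECONDITION & SPEC =====
def Spec_has_repeating_pattern_py (tokens : List String) (out : Bool) : Prop := out = has_repeating_pattern_py_alt tokens
instance (tokens : List String) (out : Bool) : Decidable (Spec_has_repeating_pattern_py tokens out) := by unfold Spec_has_repeating_pattern_py; infer_instance

-- ===== CLAIM (what is proved, stated in full; the proofs are below) =====
def Claim_equal_has_repeating_pattern_py : Prop := ∀ (tokens : List String), Dom_has_repeating_pattern_py tokens → Spec_has_repeating_pattern_py tokens (has_repeating_pattern_py tokens)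

-- ===== LEMMAS AND PROOFS =====

-- a chunk equals the prefix iff it agrees pointwise with the prefix
theorem pv_chunk_iff (l : List String) (i j : ℕ) :
    ((l.drop j).take i = l.take i) ↔ ∀ t, t < i → l[j+t]? = l[t]? := by
  constructor
  · intro h t ht
    have h' := congrArg (·[t]?) h
    simp only [List.getElem?_take, List.getElem?_drop] at h'
    rwa [if_pos ht, if_pos ht] at h'
  · intro h
    apply List.ext_getElem?
    intro t
    simp only [List.getElem?_take, List.getElem?_drop]
    by_cases ht : t < i
    · rw [if_pos ht, if_pos ht]
      exact h t ht
    · rw [if_neg ht, if_neg ht]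

-- the shift equality tokens[i:] == tokens[:n-i] in pointwise form
theorem pv_shift_iff (l : List String) (i : ℕ) :
    (l.drop i = l.take (l.length - i)) ↔ ∀ k, k < l.length - i → l[i+k]? = l[k]? := by
  constructor
  · intro h k hk
    have h' := congrArg (·[k]?) h
    simp only [List.getElem?_take, List.getElem?_drop] at h'
    rwa [if_pos hk] at h'
  · intro h
    apply List.ext_getElem?
    intro k
    rw [List.getElem?_drop, List.getElem?_take]
    by_cases hk : k < l.length - i
    · rw [if_pos hk]
      exact h k hk
    · rw [if_neg hk, List.getElem?_eq_none (by omega)]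

theorem pv_add_le_of_dvd_lt (i j n : ℕ) (hdj : i ∣ j) (hdn : i ∣ n) (h : j < n) :
    j + i ≤ n := by
  obtain ⟨a, rfl⟩ := hdj
  obtain ⟨b, rfl⟩ := hdn
  have hab : a < b := Nat.lt_of_mul_lt_mul_left h
  have : i * (a + 1) ≤ i * b := Nat.mul_le_mul_left i hab
  calc i * a + i = i * (a + 1) := by ring
    _ ≤ i * b := this

-- if every aligned chunk equals the prefix then the candidate length divides n
theorem pv_dvd_of_chunks (l : List String) (i : ℕ) (h1 : 1 ≤ i) (h2 : 2 * i ≤ l.length)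
    (hL : ∀ j, i ≤ j → j < l.length → i ∣ j → (l.drop j).take i = l.take i) :
    i ∣ l.length := by
  by_contra hnd
  set n := l.length with hn
  have hmod := Nat.div_add_mod n i
  have hmlt : n % i < i := Nat.mod_lt _ (by omega)
  have hm0 : n % i ≠ 0 := fun h => hnd ((Nat.dvd_iff_mod_eq_zero).2 h)
  have hq1 : 1 ≤ n / i := (Nat.one_le_div_iff (by omega)).2 (by omega)
  have hq : i * 1 ≤ i * (n / i) := Nat.mul_le_mul_left i hq1
  have hij : i ≤ i * (n / i) := by omega
  have hjn : i * (n / i) < n := by omega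
  have heq := hL (i * (n / i)) hij hjn ⟨n / i, rfl⟩
  have hlen := congrArg List.length heq
  simp [List.length_take, List.length_drop] at hlen
  omega

-- chunks-equal-prefix implies the shift equality (given i ∣ n)
theorem pv_shift_of_chunks (l : List String) (i : ℕ) (h1 : 1 ≤ i) (hdn : i ∣ l.length)
    (hP : ∀ j, i ≤ j → j + i ≤ l.length → i ∣ j → ∀ t, t < i → l[j+t]? = l[t]?) :
    ∀ k, k < l.length - i → l[i+k]? = l[k]? := by
  intro k hk
  set n := l.length with hn
  have hKn : i + k < n := by omega
  have hdm := Nat.div_add_mod (i + k) i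
  have hti : (i + k) % i < i := Nat.mod_lt _ (by omega)
  have hq1 : 1 ≤ (i + k) / i := (Nat.one_le_div_iff (by omega)).2 (by omega)
  have hq : i * 1 ≤ i * ((i + k) / i) := Nat.mul_le_mul_left i hq1
  have hji : i ≤ i * ((i + k) / i) := by omega
  have hjK : i * ((i + k) / i) ≤ i + k := by omega
  have hjin : i * ((i + k) / i) + i ≤ n :=
    pv_add_le_of_dvd_lt i _ n ⟨_, rfl⟩ hdn (by omega)
  have e1 : l[i+k]? = l[(i+k) % i]? := by
    have h := hP (i * ((i + k) / i)) hji hjin ⟨_, rfl⟩ ((i + k) % i) hti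
    rwa [show i * ((i + k) / i) + (i + k) % i = i + k from hdm] at h
  rcases Nat.lt_or_ge (i + k) (2 * i) with hsm | hlg
  · -- k < i: then (i+k) % i = k
    have hkk : (i + k) % i = k := by
      rw [Nat.add_mod_left, Nat.mod_eq_of_lt (by omega)]
    rw [e1, hkk]
  · -- k ≥ i: one more application at the previous chunk
    have hq2 : 2 ≤ (i + k) / i := by
      rcases Nat.lt_or_ge ((i + k) / i) 2 with hlt | hge
      · exfalso
        have he : (i + k) / i = 1 := by omega
        rw [he, Nat.mul_one] at hdm
        omega
      · exact hge
    have hji' : i ≤ i * ((i + k) / i - 1) := by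
      have : i * 2 ≤ i * ((i + k) / i) := Nat.mul_le_mul_left i hq2
      have hm : i * ((i + k) / i - 1) + i = i * ((i + k) / i) := by
        rw [← Nat.mul_succ]
        congr 1
        omega
      omega
    have hm : i * ((i + k) / i - 1) + i = i * ((i + k) / i) := by
      rw [← Nat.mul_succ]
      congr 1
      omega
    have h := hP (i * ((i + k) / i - 1)) hji' (by omega) ⟨_, rfl⟩ ((i + k) % i) hti
    have hidx : i * ((i + k) / i - 1) + (i + k) % i = k := by omega
    rw [hidx] at h
    rw [e1, h]

-- the shift equality implies chunks-equal-prefix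
theorem pv_chunks_of_shift (l : List String) (i : ℕ) (h1 : 1 ≤ i)
    (hS : ∀ k, k < l.length - i → l[i+k]? = l[k]?) :
    ∀ j, i ≤ j → j + i ≤ l.length → i ∣ j → ∀ t, t < i → l[j+t]? = l[t]? := by
  intro j
  induction j using Nat.strong_induction_on with
  | _ j ih =>
    intro hij hjin hdj t ht
    rcases Nat.eq_or_lt_of_le hij with h | h
    · rw [← h]
      exact hS t (by omega)
    · obtain ⟨q, hq⟩ := hdj
      have hq2 : 2 ≤ q := by
        rcases q with _ | _ | q
        · omega
        · omega
        · omega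
      have hm : i * (q - 1) + i = i * q := by
        rw [← Nat.mul_succ]
        congr 1
        omega
      have h2i : 2 * i ≤ j := by
        have : i * 2 ≤ i * q := Nat.mul_le_mul_left i hq2
        omega
      have step : l[j+t]? = l[(j-i)+t]? := by
        have h := hS ((j - i) + t) (by omega)
        rwa [show i + ((j - i) + t) = j + t from by omega] at h
      have hd' : i ∣ j - i := ⟨q - 1, by omega⟩
      have h' := ih (j - i) (by omega) (by omega) (by omega) hd' t ht
      rw [step, h']

-- per-candidate-length core equivalence
theorem pv_inner_iff (l : List String) (i : ℕ) (h1 : 1 ≤ i) (h2 : 2 * i ≤ l.length) :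
    (∀ J ∈ PySem.List.pyRange (i : ℤ) (l.length : ℤ) (i : ℤ),
        PySem.List.slice l (some J) (some (J + (i : ℤ))) =
          PySem.List.slice l (some 0) (some (i : ℤ)))
      ↔ (l.length % i = 0 ∧ l.drop i = l.take (l.length - i)) := by
  have hpos : (0 : ℤ) < (i : ℤ) := by exact_mod_cast h1
  have hL : (∀ J ∈ PySem.List.pyRange (i : ℤ) (l.length : ℤ) (i : ℤ),
        PySem.List.slice l (some J) (some (J + (i : ℤ))) =
          PySem.List.slice l (some 0) (some (i : ℤ)))
      ↔ (∀ j : ℕ, i ≤ j → j < l.length → i ∣ j → (l.drop j).take i = l.take i) := by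
    constructor
    · intro h j hij hjn hdj
      have hdv : (i : ℤ) ∣ (j : ℤ) - (i : ℤ) := by
        have : i ∣ j - i := Nat.dvd_sub hdj dvd_rfl
        have hc : ((j : ℤ) - (i : ℤ)) = ((j - i : ℕ) : ℤ) := by omega
        rw [hc]
        exact_mod_cast this
      have hmem : (j : ℤ) ∈ PySem.List.pyRange (i : ℤ) (l.length : ℤ) (i : ℤ) :=
        (PySem.List.mem_pyRange_iff_of_pos hpos _).2
          ⟨by exact_mod_cast hij, by exact_mod_cast hjn, hdv⟩
      have h' := h _ hmem
      rwa [PySem.List.slice_natCast_add, PySem.List.slice_zero_start,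
        PySem.List.slice_to_natCast] at h'
    · intro h J hJ
      obtain ⟨hJ1, hJ2, hJd⟩ := (PySem.List.mem_pyRange_iff_of_pos hpos _).1 hJ
      lift J to ℕ using (by omega) with j
      have hij : i ≤ j := by exact_mod_cast hJ1
      have hdj : i ∣ j := by
        have hc : ((j : ℤ) - (i : ℤ)) = ((j - i : ℕ) : ℤ) := by omega
        rw [hc] at hJd
        have hd : i ∣ j - i := by exact_mod_cast hJd
        have := Nat.dvd_add hd (dvd_refl i)
        rwa [Nat.sub_add_cancel hij] at this
      rw [PySem.List.slice_natCast_add, PySem.List.slice_zero_start,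
        PySem.List.slice_to_natCast]
      exact h j hij (by exact_mod_cast hJ2) hdj
  rw [hL]
  constructor
  · intro hAll
    have hdvd : i ∣ l.length := pv_dvd_of_chunks l i h1 h2 hAll
    refine ⟨(Nat.dvd_iff_mod_eq_zero).1 hdvd, ?_⟩
    apply (pv_shift_iff l i).2
    apply pv_shift_of_chunks l i h1 hdvd
    intro j hij hjin hdj t ht
    exact (pv_chunk_iff l i j).1 (hAll j hij (by omega) hdj) t ht
  · rintro ⟨hm, hsh⟩
    have hdvd : i ∣ l.length := (Nat.dvd_iff_mod_eq_zero).2 hm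
    intro j hij hjn hdj
    have hjin : j + i ≤ l.length := pv_add_le_of_dvd_lt i j l.length hdj hdvd hjn
    apply (pv_chunk_iff l i j).2
    exact pv_chunks_of_shift l i h1 ((pv_shift_iff l i).1 hsh) j hij hjin hdj

theorem pv_main (l : List String) :
    has_repeating_pattern_py l = has_repeating_pattern_py_alt l := by
  unfold has_repeating_pattern_py has_repeating_pattern_py_alt
  by_cases h6 : l.length < 6
  · rw [if_pos (by exact_mod_cast h6), if_pos h6]
  · rw [if_neg (by exact_mod_cast h6), if_neg h6]
    have hfd : PySem.Int.floordiv (l.length : ℤ) 2 = ((l.length / 2 : ℕ) : ℤ) := by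
      exact_mod_cast PySem.Int.floordiv_natCast l.length 2
    rw [hfd, Bool.eq_iff_iff, List.any_eq_true, List.any_eq_true]
    constructor
    · rintro ⟨I, hImem, hIp⟩
      rw [PySem.List.mem_pyRange_one] at hImem
      obtain ⟨hI1, hI2⟩ := hImem
      lift I to ℕ using (by omega) with i
      have h1 : 1 ≤ i := by exact_mod_cast hI1
      have h2 : i ≤ l.length / 2 := by
        have : (i : ℤ) < ((l.length / 2 : ℕ) : ℤ) + 1 := hI2
        omega
      refine ⟨i, List.mem_range'.2 ⟨i - 1, by omega, by omega⟩, ?_⟩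
      rw [List.all_eq_true] at hIp
      have hprop : ∀ J ∈ PySem.List.pyRange (i : ℤ) (l.length : ℤ) (i : ℤ),
          PySem.List.slice l (some J) (some (J + (i : ℤ))) =
            PySem.List.slice l (some 0) (some (i : ℤ)) := by
        intro J hJ
        exact eq_of_beq (hIp J hJ)
      obtain ⟨hm, hsh⟩ := (pv_inner_iff l i h1 (by omega)).1 hprop
      simp [hm, hsh]
    · rintro ⟨i, hmem, hp⟩
      obtain ⟨c, hc, hci⟩ := List.mem_range'.1 hmem
      have h1 : 1 ≤ i := by omega
      have h2 : i ≤ l.length / 2 := by omega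
      rw [Bool.and_eq_true, beq_iff_eq, beq_iff_eq] at hp
      obtain ⟨hm, hsh⟩ := hp
      refine ⟨(i : ℤ), PySem.List.mem_pyRange_one.2 ⟨by exact_mod_cast h1, by
        have : (i : ℤ) ≤ ((l.length / 2 : ℕ) : ℤ) := by exact_mod_cast h2
        omega⟩, ?_⟩
      rw [List.all_eq_true]
      intro J hJ
      exact beq_of_eq ((pv_inner_iff l i h1 (by omega)).2 ⟨hm, hsh⟩ J hJ)

-- ===== VERDICT (by name: the statement is the Claim_ definition above) =====
theorem has_repeating_pattern_py_spec : Claim_equal_has_repeating_pattern_py := by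
  intro tokens _
  unfold Spec_has_repeating_pattern_py
  exact pv_main tokens
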